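-- pv_equiv track=rewrite | github.com/JonasLow/CS1010E | Tutorials/Midterms/PracticePaper2.py | f
-- ===== SOURCE A (Python) =====
-- def f(val):
--     lst = [1, 7, 3, 7, -1, 9]
--     idx = -1
--     while idx >= -len(lst):
--         if lst[idx] == val:
--             break
--         idx = idx - 1
--     return idx
-- ===== SOURCE B (Python) =====
-- def f(val):
--     lst = [1, 7, 3, 7, -1, 9]
--     found = -len(lst) - 1
--     for i in range(len(lst)):
--         if lst[i] == val:
--             found = i - len(lst)
--     return found
-- ===== Notes on version B (the rewrite author's own statement) =====
-- stated objective: alternative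
-- what changed: Replaced the backward while-loop with early break by a single forward for-loop that overwrites a not-found sentinel on each match, so the last forward match gives the same from-end negative index.
import Mathlib
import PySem

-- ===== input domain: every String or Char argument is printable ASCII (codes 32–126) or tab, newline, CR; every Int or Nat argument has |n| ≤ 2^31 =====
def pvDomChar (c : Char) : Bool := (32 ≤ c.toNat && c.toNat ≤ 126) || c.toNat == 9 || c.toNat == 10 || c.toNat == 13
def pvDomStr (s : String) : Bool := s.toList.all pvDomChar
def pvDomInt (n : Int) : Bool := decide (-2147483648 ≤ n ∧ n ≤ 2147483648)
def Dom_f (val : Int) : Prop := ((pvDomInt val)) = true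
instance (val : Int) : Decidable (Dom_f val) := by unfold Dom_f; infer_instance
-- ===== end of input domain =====

-- B replaces A's backward scan with early break by a forward scan that overwrites a
-- not-found sentinel on each match (alternative decomposition, same cost).

-- ===== PORT A =====
-- the while-loop of A: idx counts down from -1 while idx ≥ -len(lst); the Nat fuel
-- (7 ≥ number of possible iterations) is only a structural totality guard
def fLoop (val : Int) (idx : Int) : Nat → Int
  | 0 => idx
  | fuel + 1 =>
    if idx ≥ -6 then
      if PySem.List.pyGet? [(1:Int), 7, 3, 7, -1, 9] idx = some val then idx
      else fLoop val (idx - 1) fuel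
    else idx

def f (val : Int) : Int := fLoop val (-1) 7

-- ===== PORT B =====
def f_alt (val : Int) : Int :=
  (PySem.List.pyRange 0 6 1).foldl
    (fun found i =>
      if PySem.List.pyGet? [(1:Int), 7, 3, 7, -1, 9] i = some val then i - 6 else found)
    (-7)

-- ===== PRECONDITION & SPEC =====
def Spec_f (val : Int) (out : Int) : Prop := out = f_alt val
instance (val : Int) (out : Int) : Decidable (Spec_f val out) := by unfold Spec_f; infer_instance

-- ===== CLAIM (what is proved, stated in full; the proofs are below) =====
def Claim_equal_f : Prop := ∀ (val : Int), Dom_f val → Spec_f val (f val)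

-- ===== LEMMAS AND PROOFS =====
theorem f_eq_alt (val : Int) : f val = f_alt val := by
  by_cases h1 : val = 1
  · subst h1; decide
  by_cases h7 : val = 7
  · subst h7; decide
  by_cases h3 : val = 3
  · subst h3; decide
  by_cases hm1 : val = -1
  · subst hm1; decide
  by_cases h9 : val = 9
  · subst h9; decide
  -- val matches no element: both return -7
  simp only [f, f_alt, fLoop]
  simp [PySem.List.pyGet?, PySem.List.pyIdx?, PySem.List.pyRange, List.foldl,
    List.range_succ, Ne.symm h1, Ne.symm h7, Ne.symm h3, Ne.symm hm1, Ne.symm h9]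

-- ===== VERDICT (by name: the statement is the Claim_ definition above) =====
theorem f_spec : Claim_equal_f := by
  intro val _
  exact f_eq_alt val
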